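-- pv_equiv track=rewrite | github.com/increpare/PuzzleScript | gen_trees.py | rule_part
-- ===== SOURCE A (Python) =====
-- def rule_part(items):
--     cells = []
--     cell = []
--     for item in items:
--         if item != '|':
--             cell.append(item)
--         else:
--             cells.append(cell)
--             cell = []
--     cells.append(cell)
--     return cells
-- ===== SOURCE B (Python) =====
-- def rule_part(items):
--     # Traverse right-to-left, building the cell list and each cell in reverse,
--     # then reverse everything once at the end.
--     rev_cells = [[]]
--     for item in reversed(items):
--         if item == '|':
--             rev_cells.append([])
--         else:
--             rev_cells[-1].append(item)
--     rev_cells.reverse()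
--     for c in rev_cells:
--         c.reverse()
--     return rev_cells
-- ===== Notes on version B (the rewrite author's own statement) =====
-- stated objective: alternative
-- what changed: Replaces A's forward loop with two forward accumulators by a right-to-left traversal that builds the cell list and each cell in reversed form and reverses everything once at the end.
import Mathlib
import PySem

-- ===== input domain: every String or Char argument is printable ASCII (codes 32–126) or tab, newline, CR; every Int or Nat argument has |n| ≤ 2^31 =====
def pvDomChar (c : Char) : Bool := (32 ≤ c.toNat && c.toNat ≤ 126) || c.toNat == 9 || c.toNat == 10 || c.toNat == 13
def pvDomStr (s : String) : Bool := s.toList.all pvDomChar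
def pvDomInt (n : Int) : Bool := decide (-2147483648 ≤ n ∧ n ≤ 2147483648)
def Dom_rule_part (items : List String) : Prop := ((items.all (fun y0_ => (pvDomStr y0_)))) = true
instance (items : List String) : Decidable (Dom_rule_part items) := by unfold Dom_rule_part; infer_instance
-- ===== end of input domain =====

-- B replaces A's forward loop with forward accumulators by a right-to-left traversal building everything reversed, fixed up by one final reversal; objective: alternative (same cost).

-- ===== PORT A =====
-- A's for-loop over items with state (cells, cell)
def rulePartLoop : List String → List (List String) → List String → List (List String)
  | [], cells, cell => cells ++ [cell]
  | item :: rest, cells, cell =>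
    if item ≠ "|" then rulePartLoop rest cells (cell ++ [item])
    else rulePartLoop rest (cells ++ [cell]) []

def rule_part (items : List String) : List (List String) :=
  rulePartLoop items [] []

-- ===== PORT B =====
-- body of B's loop over reversed(items): rc[-1].append(item) / rc.append([])
def revStep (rc : List (List String)) (item : String) : List (List String) :=
  if item = "|" then rc ++ [[]]
  else rc.dropLast ++ [rc.getLastD [] ++ [item]]

def rule_part_alt (items : List String) : List (List String) :=
  let rev_cells := items.reverse.foldl revStep [[]]
  rev_cells.reverse.map List.reverse

-- ===== PRECONDITION & SPEC =====
def Spec_rule_part (items : List String) (out : List (List String)) : Prop := out = rule_part_alt items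
instance (items : List String) (out : List (List String)) : Decidable (Spec_rule_part items out) := by unfold Spec_rule_part; infer_instance

-- ===== CLAIM (what is proved, stated in full; the proofs are below) =====
def Claim_equal_rule_part : Prop := ∀ (items : List String), Dom_rule_part items → Spec_rule_part items (rule_part items)

-- ===== LEMMAS AND PROOFS =====

-- proof-side reference: the same split as a structural foldr (front-to-back)
def splitS : List String → List (List String)
  | [] => [[]]
  | x :: xs =>
    let rest := splitS xs
    if x = "|" then [] :: rest
    else (x :: rest.headD []) :: rest.tail

theorem splitS_ne_nil (items : List String) : splitS items ≠ [] := by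
  cases items with
  | nil => simp [splitS]
  | cons x xs =>
    simp only [splitS]
    split <;> simp

theorem revfold_eq (xs : List String) :
    xs.foldr (fun item rc => revStep rc item) [[]] = ((splitS xs).map List.reverse).reverse := by
  induction xs with
  | nil => simp [splitS]
  | cons x xs ih =>
    obtain ⟨c, cs, h⟩ : ∃ c cs, splitS xs = c :: cs := by
      cases h : splitS xs with
      | nil => exact absurd h (splitS_ne_nil xs)
      | cons c cs => exact ⟨c, cs, rfl⟩
    show revStep (xs.foldr (fun item rc => revStep rc item) [[]]) x = _
    rw [ih, h]
    by_cases hx : x = "|"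
    · simp [revStep, hx, splitS, h]
    · simp [revStep, hx, splitS, h]

theorem alt_eq_splitS (items : List String) : rule_part_alt items = splitS items := by
  show ((items.reverse.foldl revStep [[]]).reverse).map List.reverse = splitS items
  rw [List.foldl_reverse]
  rw [show items.foldr (fun (y : String) (x : List (List String)) => revStep x y) [[]]
        = items.foldr (fun item rc => revStep rc item) [[]] from rfl, revfold_eq]
  simp

theorem rulePartLoop_eq (items : List String) :
    ∀ (cells : List (List String)) (cell : List String),
      rulePartLoop items cells cell
        = cells ++ ((cell ++ (splitS items).headD []) :: (splitS items).tail) := by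
  induction items with
  | nil => intro cells cell; simp [rulePartLoop, splitS]
  | cons x xs ih =>
    intro cells cell
    by_cases hx : x = "|"
    · subst hx
      obtain ⟨c, cs, h⟩ : ∃ c cs, splitS xs = c :: cs := by
        cases h : splitS xs with
        | nil => exact absurd h (splitS_ne_nil xs)
        | cons c cs => exact ⟨c, cs, rfl⟩
      show rulePartLoop xs (cells ++ [cell]) [] = _
      rw [ih, h]
      simp [splitS, h]
    · simp only [rulePartLoop, if_pos hx, splitS, if_neg hx]
      rw [ih]
      simp

-- ===== VERDICT (by name: the statement is the Claim_ definition above) =====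
theorem rule_part_spec : Claim_equal_rule_part := by
  intro items _
  unfold Spec_rule_part rule_part
  rw [rulePartLoop_eq, alt_eq_splitS]
  obtain ⟨c, cs, h⟩ : ∃ c cs, splitS items = c :: cs := by
    cases h : splitS items with
    | nil => exact absurd h (splitS_ne_nil items)
    | cons c cs => exact ⟨c, cs, rfl⟩
  simp [h]
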